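-- pv_equiv track=rewrite | github.com/hcolaux/famn_opt | build/lib/famn_opt/functions.py | chemical_symbol_first
-- ===== SOURCE A (Python) =====
-- def chemical_symbol_first(chaine):
--     ''' Makes sure that the element symbol comes before the number.
--     This is only to comply with the xml format that prohibits string starting
--     with a number.
--     '''
--     valeur_num = ''
--     valeur_car = ''
--     for truc in range(len(chaine)):
--         if chaine[truc] in '0123456789':
--            valeur_num += chaine[truc]
--         else:
--            valeur_car += chaine[truc]
--
--     return valeur_car + valeur_num
-- ===== SOURCE B (Python) =====
-- def chemical_symbol_first(chaine):
--     ''' Stable sort: non-digit characters (key False) first in original order,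
--     then digits (key True) in original order. '''
--     return ''.join(sorted(chaine, key=lambda c: c in '0123456789'))
-- ===== Notes on version B (the rewrite author's own statement) =====
-- stated objective: idiomatic
-- what changed: Replaced the explicit index loop that accumulates two buckets by repeated string concatenation with a single stable sort keyed on digit membership (non-digits keep key False and come first), joined once.
import Mathlib
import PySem

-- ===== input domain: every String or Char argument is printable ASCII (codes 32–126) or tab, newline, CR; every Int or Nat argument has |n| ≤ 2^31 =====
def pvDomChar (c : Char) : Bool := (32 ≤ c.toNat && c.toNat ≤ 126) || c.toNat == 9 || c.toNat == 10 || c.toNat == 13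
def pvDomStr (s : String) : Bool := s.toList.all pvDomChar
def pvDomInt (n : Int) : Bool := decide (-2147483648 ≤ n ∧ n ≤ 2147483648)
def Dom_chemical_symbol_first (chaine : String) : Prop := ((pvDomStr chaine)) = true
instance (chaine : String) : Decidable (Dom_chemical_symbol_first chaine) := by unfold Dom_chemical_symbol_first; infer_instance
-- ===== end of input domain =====

-- B replaces A's index loop with two string-concatenation buckets by one stable sort
-- keyed on "is a digit" (idiomatic; return values proved equal on all inputs).


-- ===== PORT A =====
-- for truc in range(len(chaine)): chaine[truc] indexed via pyGetD under the range bound;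
-- `chaine[truc] in '0123456789'` is char membership since chaine[truc] has length 1.
def chemical_symbol_first (chaine : String) : String :=
  let cs := chaine.toList
  let r := (PySem.List.pyRange 0 (PySem.Str.len chaine) 1).foldl
    (fun (acc : List Char × List Char) truc =>
      let c := PySem.List.pyGetD cs truc ' '
      if c ∈ "0123456789".toList then (acc.1 ++ [c], acc.2)
      else (acc.1, acc.2 ++ [c]))
    ([], [])
  String.ofList (r.2 ++ r.1)

-- ===== PORT B =====
-- ''.join(sorted(chaine, key=lambda c: c in '0123456789'))
def chemical_symbol_first_alt (chaine : String) : String :=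
  String.ofList
    (PySem.List.sorted chaine.toList (fun c => decide (c ∈ "0123456789".toList)) false)

-- ===== PRECONDITION & SPEC =====
def Spec_chemical_symbol_first (chaine : String) (out : String) : Prop := out = chemical_symbol_first_alt chaine
instance (chaine : String) (out : String) : Decidable (Spec_chemical_symbol_first chaine out) := by unfold Spec_chemical_symbol_first; infer_instance

-- ===== CLAIM (what is proved, stated in full; the proofs are below) =====
def Claim_equal_chemical_symbol_first : Prop := ∀ (chaine : String), Dom_chemical_symbol_first chaine → Spec_chemical_symbol_first chaine (chemical_symbol_first chaine)

-- ===== LEMMAS AND PROOFS =====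

-- the digit key, as B's port uses it
def pvDig (c : Char) : Bool := decide (c ∈ "0123456789".toList)

-- insertBy skips a prefix of elements it is not `before`
lemma insertBy_append_of_forall_not_before {α : Type} (bef : α → α → Bool) (x : α)
    (u v : List α) (h : ∀ y ∈ u, bef x y = false) :
    PySem.List.insertBy bef x (u ++ v) = u ++ PySem.List.insertBy bef x v := by
  induction u with
  | nil => simp
  | cons y u ih =>
    have hy := h y (by simp)
    simp [PySem.List.insertBy, hy, ih (fun z hz => h z (by simp [hz]))]

-- one insertion step on a partitioned accumulator
lemma insertBy_partition (x : Char) (u v : List Char)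
    (hu : ∀ c ∈ u, pvDig c = false) (hv : ∀ c ∈ v, pvDig c = true) :
    PySem.List.insertBy (fun a b => decide (pvDig a < pvDig b)) x (u ++ v)
      = if pvDig x then u ++ (v ++ [x]) else (u ++ [x]) ++ v := by
  by_cases hx : pvDig x = true
  · rw [PySem.List.insertBy_of_forall_not_before]
    · simp [hx]
    · intro y hy
      simp [Bool.lt_iff, hx]
  · rw [insertBy_append_of_forall_not_before _ _ u v
      (fun y hy => by simp [Bool.lt_iff, hu y hy])]
    cases v with
    | nil => simp [PySem.List.insertBy, hx]
    | cons w v =>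
      have hw := hv w (by simp)
      simp [PySem.List.insertBy, Bool.lt_iff, hx, hw]

-- B's stable insertion sort builds exactly the two-bucket partition
lemma foldl_insertBy_partition (cs u v : List Char)
    (hu : ∀ c ∈ u, pvDig c = false) (hv : ∀ c ∈ v, pvDig c = true) :
    cs.foldl (fun acc x => PySem.List.insertBy (fun a b => decide (pvDig a < pvDig b)) x acc)
        (u ++ v)
      = (u ++ cs.filter (fun c => !pvDig c)) ++ (v ++ cs.filter pvDig) := by
  induction cs generalizing u v with
  | nil => simp
  | cons x cs ih =>
    simp only [List.foldl_cons]
    rw [insertBy_partition x u v hu hv]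
    by_cases hx : pvDig x = true
    · rw [if_pos hx,
        ih u (v ++ [x]) hu (fun c hc => by
          rcases List.mem_append.mp hc with h | h
          · exact hv c h
          · simp at h; simp [h, hx])]
      simp [hx]
    · rw [if_neg (by simp [hx]),
        ih (u ++ [x]) v (fun c hc => by
          rcases List.mem_append.mp hc with h | h
          · exact hu c h
          · simp at h; simp [h, Bool.eq_false_iff.mpr hx]) hv]
      simp [hx]

-- A's index loop builds the same two buckets
lemma foldlA_partition (cs n car : List Char) :
    cs.foldl (fun (acc : List Char × List Char) c =>
        if c ∈ "0123456789".toList then (acc.1 ++ [c], acc.2)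
        else (acc.1, acc.2 ++ [c])) (n, car)
      = (n ++ cs.filter pvDig, car ++ cs.filter (fun c => !pvDig c)) := by
  induction cs generalizing n car with
  | nil => simp
  | cons x cs ih =>
    simp only [List.foldl_cons, List.filter_cons]
    by_cases hx : x ∈ "0123456789".toList
    · have hd : pvDig x = true := by simpa [pvDig] using hx
      rw [if_pos hx, ih, hd]
      simp
    · have hd : pvDig x = false := by simpa [pvDig] using hx
      rw [if_neg hx, ih, hd]
      simp

-- ===== VERDICT (by name: the statement is the Claim_ definition above) =====
theorem chemical_symbol_first_spec : Claim_equal_chemical_symbol_first := by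
  intro chaine _
  show _ = _
  simp only [chemical_symbol_first, chemical_symbol_first_alt]
  rw [PySem.List.sorted_eq_foldl_insertBy]
  have hB' : List.foldl (fun acc x =>
      PySem.List.insertBy (fun a b =>
        decide (decide (a ∈ "0123456789".toList) < decide (b ∈ "0123456789".toList))) x acc)
      [] chaine.toList
      = List.filter (fun c => !pvDig c) chaine.toList ++ List.filter pvDig chaine.toList := by
    have hB := foldl_insertBy_partition chaine.toList [] [] (by simp) (by simp)
    simp only [List.nil_append] at hB
    exact hB
  rw [hB']
  have hlen : PySem.Str.len chaine = (chaine.toList.length : Int) := by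
    simp [PySem.Str.len_eq]
  rw [hlen, PySem.List.foldl_pyRange_zero_pyGetD' chaine.toList ' '
      (fun (acc : List Char × List Char) c =>
        if c ∈ "0123456789".toList then (acc.1 ++ [c], acc.2) else (acc.1, acc.2 ++ [c]))
      ([], []), foldlA_partition]
  simp
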